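-- pv_equiv track=rewrite | github.com/AdamZhouSE/pythonHomework | Code/CodeRecords/2094/60604/237999.py | exc
-- ===== SOURCE A (Python) =====
-- def exc(a):
--     if a.isdigit():
--         return True
--     elif a.isalpha():
--         return False
--     else:
--         dot=False
--         E=False
--         for i in range(len(a)):
--             if i!=0 and a[i]=='-':
--                 return False
--             elif a[i]==' ':
--                 return False
--             elif a[i]=='e' and E:
--                 return False
--             elif a[i]=='e' and not E:
--                 E=True
--             elif a[i]=='.' and(dot==True or E):
--                 return False
--             elif a[i]=='.':
--                 dot=True
--     return True
-- ===== SOURCE B (Python) =====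
-- def exc(a):
--     if a.isdigit():
--         return True
--     if a.isalpha():
--         return False
--     cs = list(a)
--     if ' ' in cs or '-' in cs[1:]:
--         return False
--     if cs.count('e') > 1 or cs.count('.') > 1:
--         return False
--     if 'e' in cs and '.' in cs[cs.index('e'):]:
--         return False
--     return True
-- ===== Notes on version B (the rewrite author's own statement) =====
-- stated objective: simpler
-- what changed: Replaced A's single stateful scan (dot/exponent flags with mid-loop early returns) by independent declarative whole-string checks: forbidden-character membership, minus-sign-only-first test on the tail, exponent and dot counts, and a dot-after-first-exponent test via index().
import Mathlib
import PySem

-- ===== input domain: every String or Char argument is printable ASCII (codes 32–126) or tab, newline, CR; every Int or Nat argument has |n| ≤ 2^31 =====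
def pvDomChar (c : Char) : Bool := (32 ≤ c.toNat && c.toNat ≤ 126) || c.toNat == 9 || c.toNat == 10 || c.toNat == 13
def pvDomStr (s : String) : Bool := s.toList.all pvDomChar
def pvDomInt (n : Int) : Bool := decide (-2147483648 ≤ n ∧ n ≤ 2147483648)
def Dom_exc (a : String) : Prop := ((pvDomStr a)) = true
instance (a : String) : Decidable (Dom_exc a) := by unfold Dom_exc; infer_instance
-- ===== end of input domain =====

-- B replaces A's stateful single scan by independent declarative checks (counts/membership/first-index); objective: simpler.

-- ===== PORT A =====
-- the for-loop of A: `first` tracks `i == 0`, `dot`/`E` are A's flags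
def excLoop : List Char → Bool → Bool → Bool → Bool
  | [], _, _, _ => true
  | c :: rest, first, dot, E =>
    if !first && c == '-' then false
    else if c == ' ' then false
    else if c == 'e' && E then false
    else if c == 'e' && !E then excLoop rest false dot true
    else if c == '.' && (dot || E) then false
    else if c == '.' then excLoop rest false true E
    else excLoop rest false dot E

def exc (a : String) : Bool :=
  if PySem.Str.strIsdigit a then true
  else if PySem.Str.strIsalpha a then false
  else excLoop a.toList true false false

-- ===== PORT B =====
def exc_alt (a : String) : Bool :=
  if PySem.Str.strIsdigit a then true
  else if PySem.Str.strIsalpha a then false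
  else
    let cs := a.toList
    if cs.contains ' ' || (PySem.List.slice cs (some 1) none).contains '-' then false
    else if 1 < cs.count 'e' || 1 < cs.count '.' then false
    else if cs.contains 'e' && (cs.drop ((PySem.List.index? cs 'e').getD 0)).contains '.' then false
    else true

-- ===== PRECONDITION & SPEC =====
def Spec_exc (a : String) (out : Bool) : Prop := out = exc_alt a
instance (a : String) (out : Bool) : Decidable (Spec_exc a out) := by unfold Spec_exc; infer_instance

-- ===== CLAIM (what is proved, stated in full; the proofs are below) =====
def Claim_equal_exc : Prop := ∀ (a : String), Dom_exc a → Spec_exc a (exc a)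

-- ===== LEMMAS AND PROOFS =====

-- after an 'e' has been seen (E = true), any of ' ', '-', 'e', '.' fails
theorem excLoop_E (cs : List Char) (dot : Bool) :
    excLoop cs false dot true =
      (!cs.contains ' ' && !cs.contains '-' && !cs.contains 'e' && !cs.contains '.') := by
  induction cs generalizing dot with
  | nil => rfl
  | cons c rest ih =>
    simp only [excLoop, List.contains_cons]
    by_cases h1 : c = '-'
    · subst h1; simp
    by_cases h2 : c = ' '
    · subst h2; simp
    by_cases h3 : c = 'e'
    · subst h3; simp
    by_cases h4 : c = '.'
    · subst h4; simp
    · simp [ih, beq_eq_false_iff_ne.mpr h1, beq_eq_false_iff_ne.mpr h2,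
        beq_eq_false_iff_ne.mpr h3, beq_eq_false_iff_ne.mpr h4,
        beq_eq_false_iff_ne.mpr (Ne.symm h1), beq_eq_false_iff_ne.mpr (Ne.symm h2),
        beq_eq_false_iff_ne.mpr (Ne.symm h3), beq_eq_false_iff_ne.mpr (Ne.symm h4)]

-- after a '.' but before any 'e' (dot = true, E = false): no ' ', '-', '.', at most one 'e'
theorem excLoop_dot (cs : List Char) :
    excLoop cs false true false =
      (!cs.contains ' ' && !cs.contains '-' && !cs.contains '.' && !decide (1 < cs.count 'e')) := by
  induction cs with
  | nil => rfl
  | cons c rest ih =>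
    simp only [excLoop, List.contains_cons, List.count_cons]
    by_cases h1 : c = '-'
    · subst h1; simp
    by_cases h2 : c = ' '
    · subst h2; simp
    by_cases h3 : c = 'e'
    · subst h3
      by_cases m3 : 'e' ∈ rest
      · simp [excLoop_E, m3, Nat.lt_succ_iff, List.one_le_count_iff]
      · simp [excLoop_E, m3, Nat.lt_succ_iff, List.one_le_count_iff]
    by_cases h4 : c = '.'
    · subst h4; simp
    · simp [ih, beq_eq_false_iff_ne.mpr h1, beq_eq_false_iff_ne.mpr h2,
        beq_eq_false_iff_ne.mpr h3, beq_eq_false_iff_ne.mpr h4,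
        beq_eq_false_iff_ne.mpr (Ne.symm h1), beq_eq_false_iff_ne.mpr (Ne.symm h2),
        beq_eq_false_iff_ne.mpr (Ne.symm h3), beq_eq_false_iff_ne.mpr (Ne.symm h4)]

-- fresh state (dot = E = false), not at index 0: exactly B's remaining checks
theorem excLoop_fresh (cs : List Char) :
    excLoop cs false false false =
      (!cs.contains ' ' && !cs.contains '-' && !decide (1 < cs.count 'e') &&
       !decide (1 < cs.count '.') &&
       !(cs.contains 'e' && (cs.drop ((PySem.List.index? cs 'e').getD 0)).contains '.')) := by
  induction cs with
  | nil => rfl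
  | cons c rest ih =>
    simp only [excLoop, List.contains_cons, List.count_cons]
    by_cases h1 : c = '-'
    · subst h1; simp
    by_cases h2 : c = ' '
    · subst h2; simp
    by_cases h3 : c = 'e'
    · subst h3
      rw [PySem.List.index?_cons_self]
      by_cases m4 : '.' ∈ rest
      · simp [excLoop_E, m4]
      · simp [excLoop_E, m4, List.count_eq_zero_of_not_mem m4, Nat.lt_succ_iff,
          List.one_le_count_iff]
    by_cases h4 : c = '.'
    · subst h4
      rw [PySem.List.index?_cons_of_ne rest (show '.' ≠ 'e' by decide)]
      by_cases m4 : '.' ∈ rest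
      · simp [excLoop_dot, m4]
      · by_cases m3 : 'e' ∈ rest
        · obtain ⟨k, hk⟩ := Option.isSome_iff_exists.mp
            ((PySem.List.index?_isSome_iff rest 'e').mpr m3)
          rw [PySem.List.index?_eq_idxOf?] at hk
          have hnd : '.' ∉ List.drop k rest := fun h => m4 (List.mem_of_mem_drop h)
          simp [excLoop_dot, m4, m3, hk, hnd, Nat.lt_succ_iff, List.one_le_count_iff]
        · simp [excLoop_dot, m4, m3, Nat.lt_succ_iff, List.one_le_count_iff]
    · rw [PySem.List.index?_cons_of_ne rest (v := 'e') h3]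
      by_cases m3 : 'e' ∈ rest
      · obtain ⟨k, hk⟩ := Option.isSome_iff_exists.mp
          ((PySem.List.index?_isSome_iff rest 'e').mpr m3)
        rw [PySem.List.index?_eq_idxOf?] at hk
        simp [ih, hk, m3, beq_eq_false_iff_ne.mpr h1, beq_eq_false_iff_ne.mpr h2,
          beq_eq_false_iff_ne.mpr h3, beq_eq_false_iff_ne.mpr h4,
          beq_eq_false_iff_ne.mpr (Ne.symm h1), beq_eq_false_iff_ne.mpr (Ne.symm h2),
          beq_eq_false_iff_ne.mpr (Ne.symm h3), beq_eq_false_iff_ne.mpr (Ne.symm h4)]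
      · simp [ih, m3, beq_eq_false_iff_ne.mpr h1, beq_eq_false_iff_ne.mpr h2,
          beq_eq_false_iff_ne.mpr h3, beq_eq_false_iff_ne.mpr h4,
          beq_eq_false_iff_ne.mpr (Ne.symm h1), beq_eq_false_iff_ne.mpr (Ne.symm h2),
          beq_eq_false_iff_ne.mpr (Ne.symm h3), beq_eq_false_iff_ne.mpr (Ne.symm h4)]

-- ===== VERDICT (by name: the statement is the Claim_ definition above) =====
theorem exc_spec : Claim_equal_exc := by
  intro a _
  unfold Spec_exc exc exc_alt
  by_cases hd : PySem.Chars.strIsdigit a.toList = true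
  · simp [hd]
  by_cases ha : PySem.Chars.strIsalpha a.toList = true
  · simp [hd, ha]
  simp only [PySem.Str.strIsdigit_eq, PySem.Str.strIsalpha_eq, hd, ha, if_false,
    Bool.false_eq_true]
  rw [PySem.List.slice_from_one]
  cases hcs : a.toList with
  | nil => rfl
  | cons c rest =>
    simp only [excLoop, List.tail_cons, List.contains_cons, List.count_cons, Bool.not_true,
      Bool.false_and, if_false]
    by_cases h2 : c = ' '
    · subst h2; simp
    by_cases h3 : c = 'e'
    · subst h3
      rw [PySem.List.index?_cons_self]
      by_cases m4 : '.' ∈ rest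
      · simp [excLoop_E, m4]
      · simp [excLoop_E, m4, List.count_eq_zero_of_not_mem m4, Nat.lt_succ_iff,
          List.one_le_count_iff]
    by_cases h4 : c = '.'
    · subst h4
      rw [PySem.List.index?_cons_of_ne rest (show '.' ≠ 'e' by decide)]
      by_cases m4 : '.' ∈ rest
      · simp [excLoop_dot, m4]
      · by_cases m3 : 'e' ∈ rest
        · obtain ⟨k, hk⟩ := Option.isSome_iff_exists.mp
            ((PySem.List.index?_isSome_iff rest 'e').mpr m3)
          rw [PySem.List.index?_eq_idxOf?] at hk
          have hnd : '.' ∉ List.drop k rest := fun h => m4 (List.mem_of_mem_drop h)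
          simp [excLoop_dot, m4, m3, hk, hnd, Nat.lt_succ_iff, List.one_le_count_iff]
        · simp [excLoop_dot, m4, m3, Nat.lt_succ_iff, List.one_le_count_iff]
    · rw [PySem.List.index?_cons_of_ne rest (v := 'e') h3]
      by_cases m3 : 'e' ∈ rest
      · obtain ⟨k, hk⟩ := Option.isSome_iff_exists.mp
          ((PySem.List.index?_isSome_iff rest 'e').mpr m3)
        rw [PySem.List.index?_eq_idxOf?] at hk
        simp [excLoop_fresh, hk, m3, Bool.and_assoc, beq_eq_false_iff_ne.mpr h2,
          beq_eq_false_iff_ne.mpr h3, beq_eq_false_iff_ne.mpr h4,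
          beq_eq_false_iff_ne.mpr (Ne.symm h2), beq_eq_false_iff_ne.mpr (Ne.symm h3),
          beq_eq_false_iff_ne.mpr (Ne.symm h4)]
      · simp [excLoop_fresh, m3, Bool.and_assoc, beq_eq_false_iff_ne.mpr h2,
          beq_eq_false_iff_ne.mpr h3, beq_eq_false_iff_ne.mpr h4,
          beq_eq_false_iff_ne.mpr (Ne.symm h2), beq_eq_false_iff_ne.mpr (Ne.symm h3),
          beq_eq_false_iff_ne.mpr (Ne.symm h4)]
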